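-- pv_equiv track=rewrite | github.com/jackreichelt/aoc2020 | day14/day14.py | permutateAddress
-- ===== SOURCE A (Python) =====
-- def permutateAddress(maskedAdd):
--   permutations = []
--   for i in range(int('1' + maskedAdd.count('X')*'0', 2)):
--     perm = list(maskedAdd)
--     bits = format(i, '0'+str(maskedAdd.count('X'))+'b')
--     bitIndex = 0
--     for index, char in enumerate(perm):
--       if char == 'X':
--         perm[index] = bits[bitIndex]
--         bitIndex += 1
--     permutations.append(''.join(perm))
--   return permutations
-- ===== SOURCE B (Python) =====
-- def permutateAddress(maskedAdd):
--   tails = ['']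
--   for c in reversed(maskedAdd):
--     if c == 'X':
--       tails = ['0' + t for t in tails] + ['1' + t for t in tails]
--     else:
--       tails = [c + t for t in tails]
--   return tails
-- ===== Notes on version B (the rewrite author's own statement) =====
-- stated objective: simpler
-- what changed: Replaces the binary-counting loop (enumerating i in range(2**k) and formatting each i as a padded bit string to splice into the X positions) with a single right-to-left fold over the mask that branches on each 'X' ('0' before '1'), so no counting, no format() and no index bookkeeping are needed.
import Mathlib
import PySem

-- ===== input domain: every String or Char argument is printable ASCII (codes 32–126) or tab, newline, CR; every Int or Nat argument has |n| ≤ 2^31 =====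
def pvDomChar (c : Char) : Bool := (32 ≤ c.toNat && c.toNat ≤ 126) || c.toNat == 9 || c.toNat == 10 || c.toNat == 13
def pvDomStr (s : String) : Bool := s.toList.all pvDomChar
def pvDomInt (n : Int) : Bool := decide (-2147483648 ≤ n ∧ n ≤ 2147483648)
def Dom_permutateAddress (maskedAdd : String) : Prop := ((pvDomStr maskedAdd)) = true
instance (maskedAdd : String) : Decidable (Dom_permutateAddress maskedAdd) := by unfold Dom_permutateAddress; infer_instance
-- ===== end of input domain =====

-- B replaces A's binary-counting loop by a structural recursion over the mask string (same output, same order); objective: simpler.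


-- ===== PORT A =====
-- hand port of int(s, 2) for a string of binary digits (exact there; A only parses '1' + k*'0')
def pvBinParse (l : List Char) : Nat :=
  l.foldl (fun a c => 2 * a + (if c = '1' then 1 else 0)) 0

-- hand port of the bin-digits core of Python's format(n, 'b') for n ≥ 0: MSB-first digits, '0' for 0
def pvNatBinAux : Nat → List Char → List Char
  | 0, acc => acc
  | n + 1, acc => pvNatBinAux ((n + 1) / 2) ((if (n + 1) % 2 = 1 then '1' else '0') :: acc)
  decreasing_by exact Nat.div_lt_self (Nat.succ_pos n) (by omega)

def pvNatBin (n : Nat) : List Char := if n = 0 then ['0'] else pvNatBinAux n []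

-- hand port of format(n, '0' + str(k) + 'b') for n ≥ 0 (exact there): zero-pad on the left to width k
def pvBinFmt (n k : Nat) : List Char := List.replicate (k - (pvNatBin n).length) '0' ++ pvNatBin n

def permutateAddress (maskedAdd : String) : List String :=
  let k := PySem.Str.count maskedAdd "X"
  (PySem.List.pyRange 0 (pvBinParse ('1' :: List.replicate k '0') : Nat) 1).foldl
    (fun permutations i =>
      let perm := maskedAdd.toList
      let bits := pvBinFmt i.toNat k   -- i ≥ 0 inside range(...), so .toNat is exact
      -- enumerate loop; perm[index] is only overwritten at the already-consumed current position,
      -- so iterating the original list is exact; bits[bitIndex] is always in range here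
      -- (IndexError unreachable), .getD only makes the port total
      let r := (PySem.List.enumerate perm 0).foldl
        (fun (st : List Char × Int) p =>
          if p.2 = 'X' then
            (st.1.set p.1.toNat ((PySem.List.pyGet? bits st.2).getD p.2), st.2 + 1)
          else st)
        (perm, 0)
      permutations ++ [String.ofList r.1])
    []

-- ===== PORT B =====
-- B's loop body; B iterates the reversed string with an accumulator, i.e. a right fold
def pvStep (c : Char) (tails : List (List Char)) : List (List Char) :=
  if c = 'X' then tails.map ('0' :: ·) ++ tails.map ('1' :: ·)
  else tails.map (c :: ·)

def permutateAddress_alt (maskedAdd : String) : List String :=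
  (maskedAdd.toList.foldr pvStep [[]]).map String.ofList

-- ===== PRECONDITION & SPEC =====
def Spec_permutateAddress (maskedAdd : String) (out : List String) : Prop := out = permutateAddress_alt maskedAdd
instance (maskedAdd : String) (out : List String) : Decidable (Spec_permutateAddress maskedAdd out) := by unfold Spec_permutateAddress; infer_instance

-- ===== CLAIM (what is proved, stated in full; the proofs are below) =====
def Claim_equal_permutateAddress : Prop := ∀ (maskedAdd : String), Dom_permutateAddress maskedAdd → Spec_permutateAddress maskedAdd (permutateAddress maskedAdd)

-- ===== LEMMAS AND PROOFS =====

-- filling the 'X' positions of cs with the bits bs, in order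
def pvFill : List Char → List Char → List Char
  | [], _ => []
  | c :: cs, bs => if c = 'X' then bs.headD 'X' :: pvFill cs bs.tail else c :: pvFill cs bs

-- all bit strings of length k in binary-counting (MSB-first lexicographic) order
def pvAllBits : Nat → List (List Char)
  | 0 => [[]]
  | k + 1 => (pvAllBits k).map ('0' :: ·) ++ (pvAllBits k).map ('1' :: ·)

theorem pvFoldr_eq (cs : List Char) :
    cs.foldr pvStep [[]] = (pvAllBits (cs.count 'X')).map (pvFill cs) := by
  induction cs with
  | nil => simp [pvAllBits, pvFill]
  | cons c cs ih =>
    by_cases h : c = 'X'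
    · subst h
      simp [pvStep, pvAllBits, ih, List.map_map, Function.comp_def, pvFill]
    · simp [pvStep, h, ih, List.map_map, Function.comp_def, pvFill]

theorem pvBinParse_pow (k : Nat) :
    pvBinParse ('1' :: List.replicate k '0') = 2 ^ k := by
  have : ∀ (m : Nat) (a : Nat),
      (List.replicate m '0').foldl (fun a c => 2 * a + (if c = '1' then 1 else 0)) a = a * 2 ^ m := by
    intro m
    induction m with
    | zero => simp
    | succ m ih => intro a; simp [List.replicate_succ, ih, pow_succ]; ring
  simp [pvBinParse, this]

theorem pvNatBinAux_append (n : Nat) : ∀ acc, n ≠ 0 → pvNatBinAux n acc = pvNatBinAux n [] ++ acc := by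
  induction n using Nat.strong_induction_on with
  | _ n ih =>
    intro acc hn
    match n with
    | n + 1 =>
      rw [pvNatBinAux, pvNatBinAux]
      by_cases h : (n + 1) / 2 = 0
      · rw [h]; simp [pvNatBinAux]
      · rw [ih ((n+1)/2) (Nat.div_lt_self (Nat.succ_pos n) (by omega))
              ((if (n + 1) % 2 = 1 then '1' else '0') :: acc) h,
            ih ((n+1)/2) (Nat.div_lt_self (Nat.succ_pos n) (by omega))
              [if (n + 1) % 2 = 1 then '1' else '0'] h]
        simp

theorem pvNatBin_snoc (n : Nat) (hn : 2 ≤ n) :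
    pvNatBin n = pvNatBin (n / 2) ++ [if n % 2 = 1 then '1' else '0'] := by
  match n, hn with
  | n + 2, _ =>
    have h2 : (n + 2) / 2 ≠ 0 := by omega
    rw [pvNatBin, if_neg (by omega), pvNatBinAux,
        pvNatBinAux_append _ _ h2, pvNatBin, if_neg h2]

theorem pvBinFmt_snoc (n k : Nat) (hk : 1 ≤ k) :
    pvBinFmt n (k + 1) = pvBinFmt (n / 2) k ++ [if n % 2 = 1 then '1' else '0'] := by
  by_cases h2 : n < 2
  · have hd : pvNatBin n = [if n % 2 = 1 then '1' else '0'] := by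
      interval_cases n <;> simp [pvNatBin, pvNatBinAux]
    have h0 : pvNatBin (n / 2) = ['0'] := by
      have : n / 2 = 0 := by omega
      simp [this, pvNatBin]
    rw [pvBinFmt, pvBinFmt, hd, h0]
    simp [List.append_assoc]
    have hrep : List.replicate k '0' = List.replicate (k-1) '0' ++ ['0'] := by
      rw [show k = (k-1)+1 by omega, List.replicate_succ']
      simp [show k - 1 + 1 - 1 = k - 1 by omega]
    rw [hrep]
    simp
  · rw [pvBinFmt, pvBinFmt, pvNatBin_snoc n (by omega)]
    simp [List.append_assoc]

theorem pvAllBits_snoc (k : Nat) :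
    pvAllBits (k + 1) = (pvAllBits k).flatMap (fun bs => [bs ++ ['0'], bs ++ ['1']]) := by
  induction k with
  | zero => simp [pvAllBits]
  | succ k ih =>
    have h1 : pvAllBits (k+1+1) = (pvAllBits (k+1)).map ('0' :: ·) ++ (pvAllBits (k+1)).map ('1' :: ·) := rfl
    have h2 : pvAllBits (k+1) = (pvAllBits k).map ('0' :: ·) ++ (pvAllBits k).map ('1' :: ·) := rfl
    rw [h1]
    nth_rewrite 3 [h2]
    rw [ih]
    simp [List.map_flatMap, List.flatMap_append, List.flatMap_map]

theorem pvRange_double (n : Nat) :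
    List.range (2 * n) = (List.range n).flatMap (fun j => [2 * j, 2 * j + 1]) := by
  induction n with
  | zero => simp
  | succ n ih =>
    rw [show 2 * (n + 1) = 2 * n + 1 + 1 by ring, List.range_succ, List.range_succ,
        List.range_succ, ih]
    simp

theorem pvMapRange (k : Nat) (hk : 1 ≤ k) :
    (List.range (2 ^ k)).map (fun j => pvBinFmt j k) = pvAllBits k := by
  induction k with
  | zero => omega
  | succ k ih =>
    by_cases hk1 : 1 ≤ k
    · rw [pvAllBits_snoc, ← ih hk1, show (2:Nat) ^ (k+1) = 2 * 2 ^ k by ring, pvRange_double,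
          List.map_flatMap, List.flatMap_map]
      congr 1
      funext j
      rw [List.map_cons, List.map_cons, List.map_nil,
          pvBinFmt_snoc (2*j) k hk1, pvBinFmt_snoc (2*j+1) k hk1]
      have e1 : 2 * j / 2 = j := by omega
      have e2 : (2 * j + 1) / 2 = j := by omega
      have e3 : 2 * j % 2 = 0 := by omega
      have e4 : (2 * j + 1) % 2 = 1 := by omega
      simp [e1, e2, e3, e4]
    · have hz : k = 0 := by omega
      subst hz
      have b0 : pvBinFmt 0 1 = ['0'] := by simp [pvBinFmt, pvNatBin]
      have b1 : pvBinFmt 1 1 = ['1'] := by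
        rw [pvBinFmt, pvNatBin, if_neg one_ne_zero, pvNatBinAux]
        norm_num [pvNatBinAux]
      rw [show (2:Nat) ^ (0+1) = 2 from rfl, show List.range 2 = [0, 1] from rfl]
      simp [b0, b1, pvAllBits]

theorem pvFill_noX (cs : List Char) (h : cs.count 'X' = 0) : ∀ bs, pvFill cs bs = cs := by
  induction cs with
  | nil => intro bs; rfl
  | cons c cs ih =>
    intro bs
    have hc : ¬ c = 'X' := by
      intro hc; subst hc; simp at h
    have h' : cs.count 'X' = 0 := by
      rw [List.count_cons] at h; omega
    simp [pvFill, hc, ih h']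

-- single-char count: PySem's substring count agrees with List.count for the pattern "X"
theorem pvCountGo (l : List Char) : ∀ (fuel : Nat) (acc : Nat), l.length ≤ fuel →
    PySem.Chars.count.go ['X'] fuel l acc = acc + l.count 'X' := by
  induction l with
  | nil => intro fuel acc h; cases fuel <;> simp [PySem.Chars.count.go]
  | cons c cs ih =>
    intro fuel acc h
    match fuel with
    | f + 1 =>
      rw [PySem.Chars.count.go]
      by_cases hc : c = 'X'
      · subst hc
        simp [List.isPrefixOf, ih f (acc + 1) (by simpa using h)]
        omega
      · have hc' : ¬ 'X' = c := fun h' => hc h'.symm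
        simp [List.isPrefixOf, hc', hc, ih f acc (by simpa using h)]

theorem pvCount_eq (s : String) : PySem.Str.count s "X" = s.toList.count 'X' := by
  rw [PySem.Str.count_eq]
  show PySem.Chars.count s.toList ['X'] = _
  rw [PySem.Chars.count, if_neg (by simp)]
  rw [pvCountGo s.toList s.toList.length 0 le_rfl]
  omega

-- the inner enumerate loop computes pvFill
theorem pvInner (bits : List Char) (cs : List Char) : ∀ (pre : List Char) (bi : Nat),
    (PySem.List.enumerate cs (pre.length : Int)).foldl
      (fun (st : List Char × Int) p =>
        if p.2 = 'X' then
          (st.1.set p.1.toNat ((PySem.List.pyGet? bits st.2).getD p.2), st.2 + 1)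
        else st)
      (pre ++ cs, (bi : Int))
    = (pre ++ pvFill cs (bits.drop bi), ((bi + cs.count 'X' : Nat) : Int)) := by
  induction cs with
  | nil => intro pre bi; simp [PySem.List.enumerate_nil, pvFill]
  | cons c cs ih =>
    intro pre bi
    rw [PySem.List.enumerate_cons, List.foldl_cons]
    by_cases hc : c = 'X'
    · subst hc
      have hv : (PySem.List.pyGet? bits ((bi : Nat) : Int)).getD 'X' = (bits.drop bi).headD 'X' := by
        simp [List.headD_eq_head?_getD, List.head?_drop]
      have hset : (pre ++ 'X' :: cs).set ((pre.length : Int)).toNat ((bits.drop bi).headD 'X')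
          = (pre ++ [(bits.drop bi).headD 'X']) ++ cs := by
        simp [List.append_assoc]
      rw [hv, hset]
      have hlen : ((pre.length : Int)) + 1 = (((pre ++ [(bits.drop bi).headD 'X']).length : Nat) : Int) := by
        simp
      have hbi : ((bi : Nat) : Int) + 1 = (((bi + 1 : Nat)) : Int) := by push_cast; ring
      rw [hlen, hbi]
      simp only [if_true]
      rw [ih]
      simp [pvFill, List.tail_drop, List.append_assoc]
      ring
    · rw [if_neg hc]
      have hpre : pre ++ c :: cs = (pre ++ [c]) ++ cs := by simp
      have hlen : ((pre.length : Int)) + 1 = (((pre ++ [c]).length : Nat) : Int) := by simp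
      rw [hpre, hlen, ih]
      simp [pvFill, hc]

-- ===== VERDICT (by name: the statement is the Claim_ definition above) =====
theorem permutateAddress_spec : Claim_equal_permutateAddress := by
  unfold Claim_equal_permutateAddress
  intro s _
  unfold Spec_permutateAddress
  simp only [permutateAddress, permutateAddress_alt]
  rw [pvFoldr_eq, pvCount_eq, pvBinParse_pow]
  have hinner : ∀ bits : List Char,
      (PySem.List.enumerate s.toList 0).foldl
        (fun (st : List Char × Int) p =>
          if p.2 = 'X' then
            (st.1.set p.1.toNat ((PySem.List.pyGet? bits st.2).getD p.2), st.2 + 1)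
          else st)
        (s.toList, 0)
      = (pvFill s.toList bits, (s.toList.count 'X' : Int)) := by
    intro bits
    have := pvInner bits s.toList [] 0
    simpa using this
  rw [PySem.List.foldl_append_singleton_eq_map]
  rw [PySem.List.pyRange_one]
  simp only [List.map_map, hinner]
  by_cases hk : s.toList.count 'X' = 0
  · rw [hk]
    simp [pvAllBits, pvFill_noX s.toList hk]
  · have hk1 : 1 ≤ s.toList.count 'X' := by omega
    rw [← pvMapRange _ hk1]
    simp [Function.comp_def]
    norm_cast
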